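-- pv_equiv track=rewrite | github.com/rogeroyer/2019-CCF-BDCI-Finance-Information-Negative-Judgment | Entity_Model/model_xiong/roberta_wwm_large_ext_entity_skfold/preprocess.py | entity_clear_row
-- ===== SOURCE A (Python) =====
-- def entity_clear_row(entity, content):
--     entities = entity.split(';')
--     entities.sort(key=lambda x:len(x))
--     n = len(entities)
--     tmp = entities.copy()
--     for i in range(n):
--         entity_tmp = entities[i]
--         if len(entity_tmp) <= 1:
--             tmp.remove(entity_tmp)
--             continue
--         if i+1 >= n:
--             break
--         for entity_tmp2 in entities[i+1:]:
--             if entity_tmp2.find(entity_tmp) != -1 and (entity_tmp2.find('?') != -1 or content.replace(entity_tmp2,'').find(entity_tmp) == -1):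
--                 tmp.remove(entity_tmp)
--                 break
--     return ';'.join(tmp)
-- ===== SOURCE B (Python) =====
-- def entity_clear_row(entity, content):
--     ents = sorted(entity.split(';'), key=len)
--     drop = {}
--     for i, e in enumerate(ents):
--         if len(e) <= 1 or any(e in e2 and ('?' in e2 or e not in content.replace(e2, ''))
--                               for e2 in ents[i + 1:]):
--             drop[e] = drop.get(e, 0) + 1
--     kept = []
--     for e in ents:
--         if drop.get(e, 0) > 0:
--             drop[e] = drop[e] - 1
--         else:
--             kept.append(e)
--     return ';'.join(kept)
-- ===== Notes on version B (the rewrite author's own statement) =====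
-- stated objective: alternative
-- what changed: Replaces A's in-place mutation of a working copy via repeated tmp.remove inside an index loop with a break by a two-pass decide-then-reconstruct: pass one builds a per-value removal-count dict from the same pairwise substring condition, pass two rebuilds the kept list by skipping the first k occurrences of each value.
import Mathlib
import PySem

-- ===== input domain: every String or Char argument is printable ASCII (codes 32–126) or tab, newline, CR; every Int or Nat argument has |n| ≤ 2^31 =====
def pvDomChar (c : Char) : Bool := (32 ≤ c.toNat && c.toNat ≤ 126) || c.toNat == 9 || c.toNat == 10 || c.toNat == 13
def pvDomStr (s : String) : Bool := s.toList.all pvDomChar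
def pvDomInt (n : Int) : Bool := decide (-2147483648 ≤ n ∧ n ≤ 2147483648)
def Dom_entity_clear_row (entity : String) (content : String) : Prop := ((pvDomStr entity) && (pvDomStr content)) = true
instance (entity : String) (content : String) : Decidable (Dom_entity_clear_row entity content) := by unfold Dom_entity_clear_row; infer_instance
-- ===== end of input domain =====

-- B replaces A's in-place tmp.remove mutation loop (with its inner break) by a two-pass
-- decide-then-reconstruct: a per-value removal-count dict, then a rebuild skipping counted
-- occurrences; same return value (objective: alternative, no speed claim).


-- ===== PORT A =====
-- the condition of A's inner 'if' (entity_tmp2.find(entity_tmp) != -1 and (… or …))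
def pvCondA (content entity_tmp entity_tmp2 : String) : Bool :=
  PySem.Str.find entity_tmp2 entity_tmp != -1 &&
    (PySem.Str.find entity_tmp2 "?" != -1 ||
      PySem.Str.find (PySem.Str.replace content entity_tmp2 "") entity_tmp == -1)

-- A's inner 'for entity_tmp2 in entities[i+1:]: if …: tmp.remove(…); break' — true iff the remove fires
def pvInnerA (content entity_tmp : String) : List String → Bool
  | [] => false
  | entity_tmp2 :: rest =>
    if pvCondA content entity_tmp entity_tmp2 then true else pvInnerA content entity_tmp rest

-- A's outer 'for i in range(n)' carrying the working copy tmp; the bare 'tmp' branch is the 'break'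
def pvLoopA (entities : List String) (content : String) (n : Int) : List Int → List String → List String
  | [], tmp => tmp
  | i :: rest, tmp =>
    let entity_tmp := PySem.List.pyGetD entities i ""
    if PySem.Str.len entity_tmp ≤ 1 then
      pvLoopA entities content n rest ((PySem.List.remove? tmp entity_tmp).getD tmp)
    else if i + 1 ≥ n then tmp
    else if pvInnerA content entity_tmp (PySem.List.slice entities (some (i + 1)) none) then
      pvLoopA entities content n rest ((PySem.List.remove? tmp entity_tmp).getD tmp)
    else pvLoopA entities content n rest tmp

def entity_clear_row (entity : String) (content : String) : String :=
  let entities := PySem.List.sorted ((PySem.Str.split? entity ";").getD []) (fun x => PySem.Str.len x) false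
  let n : Int := entities.length
  let tmp := pvLoopA entities content n (PySem.List.pyRange 0 n 1) entities
  PySem.Str.join ";" tmp

-- ===== PORT B =====
-- the same pairwise condition written as B writes it, with 'in'
def pvCondB (content e e2 : String) : Bool :=
  PySem.Str.isIn e e2 &&
    (PySem.Str.isIn "?" e2 || !PySem.Str.isIn e (PySem.Str.replace content e2 ""))

def entity_clear_row_alt (entity : String) (content : String) : String :=
  let ents := PySem.List.sorted ((PySem.Str.split? entity ";").getD []) (fun x => PySem.Str.len x) false
  let drop := (PySem.List.enumerate ents 0).foldl
    (fun (d : PySem.Dict String Int) p =>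
      if PySem.Str.len p.2 ≤ 1 ||
         (PySem.List.slice ents (some (p.1 + 1)) none).any (pvCondB content p.2) then
        d.insert p.2 (d.getD p.2 0 + 1)
      else d)
    PySem.Dict.empty
  let res := ents.foldl
    (fun (s : PySem.Dict String Int × List String) e =>
      if s.1.getD e 0 > 0 then (s.1.insert e (s.1.getD e 0 - 1), s.2)
      else (s.1, s.2 ++ [e]))
    (drop, [])
  PySem.Str.join ";" res.2

-- ===== PRECONDITION & SPEC =====
def Spec_entity_clear_row (entity : String) (content : String) (out : String) : Prop := out = entity_clear_row_alt entity content
instance (entity : String) (content : String) (out : String) : Decidable (Spec_entity_clear_row entity content out) := by unfold Spec_entity_clear_row; infer_instance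

-- ===== CLAIM (what is proved, stated in full; the proofs are below) =====
def Claim_equal_entity_clear_row : Prop := ∀ (entity : String) (content : String), Dom_entity_clear_row entity content → Spec_entity_clear_row entity content (entity_clear_row entity content)

-- ===== LEMMAS AND PROOFS =====

-- A's condition and B's condition agree
theorem pvFind_bne (s sub : String) : (PySem.Str.find s sub != -1) = PySem.Str.isIn sub s := by
  simp only [PySem.Str.find_eq, PySem.Str.isIn_eq]
  by_cases h : sub.toList <:+: s.toList
  · simp [(PySem.Chars.find_ne_neg_one_iff _ _).mpr h, (PySem.Chars.isIn_iff_infix _ _).mpr h]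
  · simp [(PySem.Chars.find_eq_neg_one_iff _ _).mpr h,
      (PySem.Chars.isIn_iff_infix sub.toList s.toList).not.mpr h]

theorem pvFind_beq (s sub : String) : (PySem.Str.find s sub == -1) = !PySem.Str.isIn sub s := by
  have h := pvFind_bne s sub
  rw [← h]; cases hx : (PySem.Str.find s sub == -1) <;> simp_all [bne]

theorem pvCondA_eq_condB (content e e2 : String) : pvCondA content e e2 = pvCondB content e e2 := by
  unfold pvCondA pvCondB
  rw [pvFind_bne, pvFind_bne, pvFind_beq]

-- the per-index drop decision both programs evaluate, phrased with A's condition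
def pvDec (ents : List String) (content : String) (i : Int) : Bool :=
  PySem.Str.len (PySem.List.pyGetD ents i "") ≤ 1 ||
    (PySem.List.slice ents (some (i + 1)) none).any (pvCondA content (PySem.List.pyGetD ents i ""))

-- the multiset of values A removes, in index order
def pvDrops (ents : List String) (content : String) (is : List Int) : List String :=
  (is.filter (pvDec ents content)).map (fun i => PySem.List.pyGetD ents i "")

-- reference reconstruction: skip the first (c s) occurrences of each value s
def pvSkip : List String → (String → Nat) → List String
  | [], _ => []
  | e :: es, c =>
    if 0 < c e then pvSkip es (fun s => if s = e then c e - 1 else c s)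
    else e :: pvSkip es (c ·)

theorem pvRemove_skip (t : List String) : ∀ (c : String → Nat) (v : String), c v < t.count v →
    PySem.List.remove? (pvSkip t c) v = some (pvSkip t (fun s => if s = v then c v + 1 else c s)) := by
  induction t with
  | nil => intro c v h; simp at h
  | cons e es ih =>
    intro c v h
    by_cases hce : 0 < c e
    · have hv : (if v = e then c e - 1 else c v) < es.count v := by
        by_cases hve : v = e
        · subst hve; rw [List.count_cons_self] at h; rw [if_pos rfl]; omega
        · rw [if_neg hve]; rwa [List.count_cons_of_ne (Ne.symm hve)] at h
      rw [pvSkip, if_pos hce, ih _ _ hv, pvSkip]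
      have hhead : 0 < (if e = v then c v + 1 else c e) := by split <;> omega
      rw [if_pos hhead]
      congr 1
      apply congrArg
      funext s
      by_cases hve : v = e <;> by_cases hse : s = e <;> by_cases hsv : s = v <;>
        simp [hve, hse, hsv] <;> (try subst_vars) <;> simp_all <;> omega
    · have hce0 : c e = 0 := by omega
      rw [pvSkip, if_neg hce]
      by_cases hve : v = e
      · subst hve
        rw [PySem.List.remove?_cons_self, pvSkip, if_pos (by simp)]
        congr 1
        apply congrArg
        funext s
        by_cases hsv : s = v <;> simp [hsv] <;> omega
      · have hv : c v < es.count v := by rwa [List.count_cons_of_ne (Ne.symm hve)] at h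
        rw [PySem.List.remove?_cons_of_ne _ (Ne.symm hve), ih _ _ hv, pvSkip,
          if_neg (by simp [Ne.symm hve, hce0])]
        rfl

theorem pvSkip_zero (t : List String) : pvSkip t (fun _ => 0) = t := by
  induction t with
  | nil => rfl
  | cons e es ih => simp [pvSkip, ih]

theorem pvFold_removes (vs : List String) : ∀ (t : List String) (c : String → Nat),
    (∀ s, c s + vs.count s ≤ t.count s) →
    vs.foldl (fun acc v => (PySem.List.remove? acc v).getD acc) (pvSkip t c)
      = pvSkip t (fun s => c s + vs.count s) := by
  induction vs with
  | nil => intro t c h; simp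
  | cons v vs ih =>
    intro t c h
    have hv : c v < t.count v := by
      have := h v; rw [List.count_cons_self] at this; omega
    rw [List.foldl_cons, pvRemove_skip t c v hv, Option.getD_some,
      ih t _ (by
        intro s
        have hs := h s
        by_cases hsv : s = v
        · subst hsv; rw [List.count_cons_self] at hs; rw [if_pos rfl]; omega
        · rw [List.count_cons_of_ne (Ne.symm hsv)] at hs; rw [if_neg hsv]; omega)]
    congr 1
    funext s
    by_cases hsv : s = v
    · subst hsv; rw [if_pos rfl, List.count_cons_self]; omega
    · rw [if_neg hsv, List.count_cons_of_ne (Ne.symm hsv)]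

theorem pvInnerA_eq_any (content e : String) (l : List String) :
    pvInnerA content e l = l.any (pvCondA content e) := by
  induction l with
  | nil => rfl
  | cons x xs ih => by_cases h : pvCondA content e x = true <;> simp [pvInnerA, h, ih]

theorem pvLoopA_eq (ents : List String) (content : String) : ∀ (is : List Int) (tmp : List String),
    is.Pairwise (· < ·) → (∀ i ∈ is, 0 ≤ i ∧ i < (ents.length : Int)) →
    pvLoopA ents content (ents.length : Int) is tmp
      = (pvDrops ents content is).foldl (fun acc v => (PySem.List.remove? acc v).getD acc) tmp := by
  intro is
  induction is with
  | nil => intro tmp _ _; rfl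
  | cons i rest ih =>
    intro tmp hp hb
    have hi := hb i (by simp)
    have hbt : ∀ j ∈ rest, 0 ≤ j ∧ j < (ents.length : Int) := fun j hj => hb j (by simp [hj])
    rw [pvLoopA]
    by_cases h1 : PySem.Str.len (PySem.List.pyGetD ents i "") ≤ 1
    · rw [if_pos h1]
      have h1' : (PySem.List.pyGetD ents i "").length ≤ 1 := by
        rw [PySem.Str.len_eq] at h1; exact_mod_cast h1
      have hdec : pvDec ents content i = true := by unfold pvDec; simp [h1']
      rw [pvDrops, List.filter_cons, if_pos hdec, List.map_cons, List.foldl_cons]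
      exact ih _ hp.tail hbt
    · rw [if_neg h1]
      by_cases h2 : i + 1 ≥ (ents.length : Int)
      · rw [if_pos h2]
        have hrest : rest = [] := by
          rw [List.eq_nil_iff_forall_not_mem]
          intro j hj
          have h3 := (List.pairwise_cons.mp hp).1 j hj
          have h4 := (hbt j hj).2
          omega
        subst hrest
        have hsl : PySem.List.slice ents (some (i + 1)) none = ([] : List String) := by
          rw [PySem.List.slice_from ents (by omega)]
          exact List.drop_eq_nil_of_le (by omega)
        have h1' : ¬ (PySem.List.pyGetD ents i "").length ≤ 1 := by
          rw [PySem.Str.len_eq] at h1; intro hco; exact h1 (by exact_mod_cast hco)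
        have hdec : pvDec ents content i = false := by
          unfold pvDec; simp [hsl]; omega
        rw [pvDrops, List.filter_cons, if_neg (by simp [hdec])]
        rfl
      · rw [if_neg h2]
        rw [pvInnerA_eq_any]
        have hdec : pvDec ents content i
            = (PySem.List.slice ents (some (i + 1)) none).any (pvCondA content (PySem.List.pyGetD ents i "")) := by
          have h1' : ¬ (PySem.List.pyGetD ents i "").length ≤ 1 := by
            rw [PySem.Str.len_eq] at h1; intro hco; exact h1 (by exact_mod_cast hco)
          unfold pvDec; simp [h1']
        by_cases h3 : (PySem.List.slice ents (some (i + 1)) none).any (pvCondA content (PySem.List.pyGetD ents i "")) = true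
        · rw [if_pos h3, pvDrops, List.filter_cons, if_pos (hdec.trans h3), List.map_cons,
            List.foldl_cons]
          exact ih _ hp.tail hbt
        · rw [if_neg h3, pvDrops, List.filter_cons, if_neg (by rw [hdec]; simpa using h3)]
          exact ih _ hp.tail hbt

theorem pvPyRange_pairwise (k : Nat) : ∀ (a b : Int), (b - a).toNat = k →
    (PySem.List.pyRange a b).Pairwise (· < ·) := by
  induction k with
  | zero =>
    intro a b hk
    have hempty : PySem.List.pyRange a b = [] := by
      rw [List.eq_nil_iff_forall_not_mem]
      intro x hx
      have := PySem.List.mem_pyRange_one.mp hx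
      omega
    rw [hempty]; exact List.Pairwise.nil
  | succ k ih =>
    intro a b hk
    by_cases hab : a < b
    · rw [PySem.List.pyRange_one_cons hab, List.pairwise_cons]
      exact ⟨fun x hx => (PySem.List.mem_pyRange_one.mp hx).1.trans_lt' (by omega),
        ih (a + 1) b (by omega)⟩
    · have hempty : PySem.List.pyRange a b = [] := by
        rw [List.eq_nil_iff_forall_not_mem]
        intro x hx
        have := PySem.List.mem_pyRange_one.mp hx
        omega
      rw [hempty]; exact List.Pairwise.nil

theorem pvDrops_count_le (ents : List String) (content : String) (s : String) :
    (pvDrops ents content (PySem.List.pyRange 0 (ents.length : Int))).count s ≤ ents.count s := by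
  have hsub : List.Sublist (pvDrops ents content (PySem.List.pyRange 0 (ents.length : Int)))
      ((PySem.List.pyRange 0 (ents.length : Int)).map (fun j => PySem.List.pyGetD ents j "")) :=
    List.Sublist.map _ List.filter_sublist
  have hmap : (PySem.List.pyRange 0 (ents.length : Int)).map (fun j => PySem.List.pyGetD ents j "") = ents := by
    have := PySem.List.map_pyGetD_pyRange_zero ents ""
    simpa [PySem.List.len] using this
  rw [hmap] at hsub
  exact hsub.count_le s

theorem pvPass1_getD (ents : List String) (content : String) (s : String) :
    ((PySem.List.enumerate ents 0).foldl
      (fun (d : PySem.Dict String Int) p =>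
        if PySem.Str.len p.2 ≤ 1 ||
           (PySem.List.slice ents (some (p.1 + 1)) none).any (pvCondB content p.2) then
          d.insert p.2 (d.getD p.2 0 + 1)
        else d)
      PySem.Dict.empty).getD s 0
      = ((pvDrops ents content (PySem.List.pyRange 0 (ents.length : Int))).count s : Int) := by
  rw [show PySem.List.enumerate ents 0 = PySem.List.enumerate ents from rfl,
    PySem.List.enumerate_eq_map_pyRange ents "", List.foldl_map]
  simp only [Prod.fst, Prod.snd]
  rw [PySem.List.foldl_congr_mem (PySem.List.pyRange 0 (PySem.List.len ents))
    (fun (x : PySem.Dict String Int) (y : Int) =>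
      if (decide (PySem.Str.len (PySem.List.pyGetD ents y "") ≤ 1) ||
          (PySem.List.slice ents (some (y + 1)) none).any (pvCondB content (PySem.List.pyGetD ents y ""))) = true then
        x.insert (PySem.List.pyGetD ents y "") (x.getD (PySem.List.pyGetD ents y "") 0 + 1)
      else x)
    (fun (x : PySem.Dict String Int) (y : Int) =>
      if pvDec ents content y then
        x.insert (PySem.List.pyGetD ents y "") (x.getD (PySem.List.pyGetD ents y "") 0 + 1)
      else x)
    PySem.Dict.empty
    (by
      intro d j _
      have hc : (pvCondB content (PySem.List.pyGetD ents j ""))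
          = (pvCondA content (PySem.List.pyGetD ents j "")) := by
        funext e2; exact (pvCondA_eq_condB content _ e2).symm
      simp only []
      unfold pvDec
      rw [hc])]
  simp only [PySem.List.len_eq]
  rw [PySem.List.foldl_if_eq_foldl_filter (pvDec ents content)
    (fun (d : PySem.Dict String Int) (j : Int) =>
      d.insert (PySem.List.pyGetD ents j "") (d.getD (PySem.List.pyGetD ents j "") 0 + 1))]
  rw [← List.foldl_map (f := fun j => PySem.List.pyGetD ents j "")
    (g := fun (d : PySem.Dict String Int) x => d.insert x (d.getD x 0 + 1))]
  rw [show ((PySem.List.pyRange 0 (ents.length : Int)).filter (pvDec ents content)).map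
        (fun j => PySem.List.pyGetD ents j "")
      = pvDrops ents content (PySem.List.pyRange 0 (ents.length : Int)) from rfl]
  rw [PySem.Dict.getD_foldl_insert_add_one]
  simp

theorem pvPass2 (l : List String) : ∀ (d : PySem.Dict String Int) (c : String → Nat) (kept : List String),
    (∀ s, d.getD s 0 = (c s : Int)) →
    (l.foldl (fun (s : PySem.Dict String Int × List String) e =>
      if s.1.getD e 0 > 0 then (s.1.insert e (s.1.getD e 0 - 1), s.2)
      else (s.1, s.2 ++ [e])) (d, kept)).2 = kept ++ pvSkip l c := by
  induction l with
  | nil => intro d c kept h; simp [pvSkip]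
  | cons e es ih =>
    intro d c kept h
    rw [List.foldl_cons]
    simp only []
    by_cases hc : 0 < c e
    · have hd : d.getD e 0 > 0 := by rw [h e]; exact_mod_cast hc
      rw [if_pos hd, pvSkip, if_pos hc]
      exact ih _ _ _ (by
        intro s
        rw [PySem.Dict.getD_insert]
        by_cases hse : s = e
        · rw [if_pos hse, hse, h e]
          rw [if_pos rfl]
          omega
        · rw [if_neg hse, h s]
          simp [hse])
    · have hd : ¬ d.getD e 0 > 0 := by rw [h e]; intro hco; exact hc (by exact_mod_cast hco)
      rw [if_neg hd, pvSkip, if_neg hc]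
      rw [ih _ _ _ h]
      simp

theorem pv_main (entity content : String) :
    entity_clear_row entity content = entity_clear_row_alt entity content := by
  unfold entity_clear_row entity_clear_row_alt
  simp only []
  set ents := PySem.List.sorted ((PySem.Str.split? entity ";").getD []) (fun x => PySem.Str.len x) false with hents
  apply congrArg
  have hA : pvLoopA ents content (ents.length : Int) (PySem.List.pyRange 0 (ents.length : Int) 1) ents
      = pvSkip ents (fun s => (pvDrops ents content (PySem.List.pyRange 0 (ents.length : Int))).count s) := by
    rw [pvLoopA_eq ents content _ ents (pvPyRange_pairwise ((ents.length : Int) - 0).toNat 0 _ rfl)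
      (fun i hi => by have := PySem.List.mem_pyRange_one.mp hi; omega)]
    have hfold := pvFold_removes (pvDrops ents content (PySem.List.pyRange 0 (ents.length : Int)))
      ents (fun _ => 0) (fun s => by simpa using pvDrops_count_le ents content s)
    rw [pvSkip_zero] at hfold
    rw [hfold]
    congr 1
    funext s
    simp
  have hB : ((ents.foldl
      (fun (s : PySem.Dict String Int × List String) e =>
        if s.1.getD e 0 > 0 then (s.1.insert e (s.1.getD e 0 - 1), s.2)
        else (s.1, s.2 ++ [e]))
      ((PySem.List.enumerate ents 0).foldl
        (fun (d : PySem.Dict String Int) p =>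
          if PySem.Str.len p.2 ≤ 1 ||
             (PySem.List.slice ents (some (p.1 + 1)) none).any (pvCondB content p.2) then
            d.insert p.2 (d.getD p.2 0 + 1)
          else d)
        PySem.Dict.empty, ([] : List String))).2)
      = pvSkip ents (fun s => (pvDrops ents content (PySem.List.pyRange 0 (ents.length : Int))).count s) := by
    rw [pvPass2 ents _ _ [] (fun s => pvPass1_getD ents content s)]
    simp
  rw [hA, hB]

-- ===== VERDICT (by name: the statement is the Claim_ definition above) =====
theorem entity_clear_row_spec : Claim_equal_entity_clear_row := by
  intro entity content _
  unfold Spec_entity_clear_row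
  exact pv_main entity content
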